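-- pv_equiv track=rewrite | github.com/rigyeonghong/algorithm | codility/7_2.py | solution
-- ===== SOURCE A (Python) =====
-- def solution(A, B):
--     result = 0
--     down_value = 0
--     for i in range(len(B)):
--         if B[i] == 0:
--             if A[i] > down_value:
--                 result += 1
--         else:
--             down_value = A[i]
--     return result
-- ===== SOURCE B (Python) =====
-- def solution(A, B):
--     # Different algorithm: collect the positions of downstream fish once,
--     # then for each upstream fish binary-search its nearest downstream
--     # predecessor instead of carrying a running value through the loop.
--     n = len(B)
--     pos = [i for i in range(n) if B[i] != 0]
--     count = 0
--     for i in range(n):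
--         if B[i] == 0:
--             lo, hi = 0, len(pos)
--             while lo < hi:
--                 mid = (lo + hi) // 2
--                 if pos[mid] < i:
--                     lo = mid + 1
--                 else:
--                     hi = mid
--             prev = A[pos[lo - 1]] if lo > 0 else 0
--             if A[i] > prev:
--                 count += 1
--     return count
-- ===== Notes on version B (the rewrite author's own statement) =====
-- stated objective: alternative
-- what changed: Instead of one pass carrying a running down_value, B builds the list of downstream-fish positions once and answers each upstream fish independently by a hand-written binary search for its nearest preceding downstream position.
import Mathlib
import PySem

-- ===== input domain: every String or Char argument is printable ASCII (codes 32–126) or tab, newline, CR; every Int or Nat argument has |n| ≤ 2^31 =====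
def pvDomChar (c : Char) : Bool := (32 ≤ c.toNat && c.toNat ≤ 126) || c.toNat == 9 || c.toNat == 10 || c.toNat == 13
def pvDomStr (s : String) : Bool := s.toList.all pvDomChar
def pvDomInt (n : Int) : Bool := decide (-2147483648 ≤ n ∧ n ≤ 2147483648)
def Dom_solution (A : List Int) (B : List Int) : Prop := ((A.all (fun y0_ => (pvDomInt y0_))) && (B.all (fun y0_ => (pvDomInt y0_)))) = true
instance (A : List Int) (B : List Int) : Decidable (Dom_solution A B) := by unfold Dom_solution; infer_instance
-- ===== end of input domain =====

-- B replaces A's single carried-state pass by a different algorithm: it collects the downstream-fish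
-- positions once and answers each upstream fish by binary search for its nearest downstream predecessor.


-- ===== PORT A =====
-- A: one index loop over range(len(B)) carrying (result, down_value); A[i]/B[i] via pyGetD
-- (in range under Pre_solution, where Python never raises).
def solution (A : List Int) (B : List Int) : Int :=
  ((PySem.List.pyRange 0 (B.length : Int) 1).foldl
    (fun (st : Int × Int) i =>
      if PySem.List.pyGetD B i 0 = 0 then
        (if PySem.List.pyGetD A i 0 > st.2 then (st.1 + 1, st.2) else st)
      else
        (st.1, PySem.List.pyGetD A i 0))
    (0, 0)).1

-- ===== PORT B =====
-- Source B's hand-written binary search: while lo < hi: mid = (lo+hi)//2; ... (ported step for step;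
-- (lo+hi)//2 on the Nat-valued lo, hi is exactly Nat division; the fuel argument only makes the
-- while loop total — hi - lo shrinks every iteration, so fuel = initial hi - lo never runs out)
def bsearch (pos : List Int) (i : Int) : Nat → Nat → Nat → Nat
  | 0, lo, _hi => lo
  | fuel + 1, lo, hi =>
    if lo < hi then
      let mid := (lo + hi) / 2
      if PySem.List.pyGetD pos (mid : Int) 0 < i then bsearch pos i fuel (mid + 1) hi
      else bsearch pos i fuel lo mid
    else lo

def solution_alt (A : List Int) (B : List Int) : Int :=
  let n := (B.length : Int)
  let pos := (PySem.List.pyRange 0 n 1).filter (fun j => !(PySem.List.pyGetD B j 0 == 0))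
  (PySem.List.pyRange 0 n 1).foldl
    (fun cnt i =>
      if PySem.List.pyGetD B i 0 = 0 then
        let lo := bsearch pos i pos.length 0 pos.length
        let prev := if 0 < lo then PySem.List.pyGetD A (PySem.List.pyGetD pos ((lo : Int) - 1) 0) 0 else 0
        if PySem.List.pyGetD A i 0 > prev then cnt + 1 else cnt
      else cnt) 0

-- ===== PRECONDITION & SPEC =====
-- A indexes A[i] for every i < len(B), so it raises IndexError iff len(A) < len(B); exactly those inputs are excluded.
def Pre_solution (A : List Int) (B : List Int) : Prop := B.length ≤ A.length
instance (A : List Int) (B : List Int) : Decidable (Pre_solution A B) := by unfold Pre_solution; infer_instance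
def pvWitness_solution : List Int × List Int := ([1, 0, 2], [0, 1, 0])

def Spec_solution (A : List Int) (B : List Int) (out : Int) : Prop := out = solution_alt A B
instance (A : List Int) (B : List Int) (out : Int) : Decidable (Spec_solution A B out) := by unfold Spec_solution; infer_instance

-- ===== CLAIM (what is proved, stated in full; the proofs are below) =====
def Claim_equal_solution : Prop := ∀ (A : List Int) (B : List Int), Dom_solution A B → Pre_solution A B → Spec_solution A B (solution A B)

-- ===== LEMMAS AND PROOFS =====

-- the indices k < i with B[k] != 0, in increasing order (proof-side helper)
def nzPos (B : List Int) (i : Nat) : List Nat :=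
  (List.range i).filter (fun k => !(B.getD k 0 == 0))

-- the value A's down_value holds when the loop reaches index i (proof-side helper)
def lastDown (A B : List Int) : Nat → Int
  | 0 => 0
  | k + 1 => if B.getD k 0 == 0 then lastDown A B k else A.getD k 0

-- B's position table is nzPos over the whole list, cast to Int
lemma pos_eq (B : List Int) :
    (PySem.List.pyRange 0 (B.length : Int) 1).filter (fun j => !(PySem.List.pyGetD B j 0 == 0))
      = (nzPos B B.length).map (fun k : Nat => (k : Int)) := by
  rw [PySem.List.pyRange_zero_nat, List.filter_map]
  unfold nzPos
  rw [List.filter_congr (l := List.range B.length) (q := fun k => !(B.getD k 0 == 0)) ?_]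
  intro k _
  simp [Function.comp, PySem.List.pyGetD_natCast]

lemma nzPos_split (B : List Int) {i n : Nat} (h : i ≤ n) :
    nzPos B n = nzPos B i ++ (List.range' i (n - i)).filter (fun k => !(B.getD k 0 == 0)) := by
  unfold nzPos
  rw [← List.filter_append]
  congr 1
  rw [List.range_eq_range', List.range_eq_range']
  have h2 := @List.range'_append 0 i (n - i) 1
  simp only [one_mul, Nat.zero_add] at h2
  rw [h2]
  congr 1
  omega

lemma nzPos_mem_lt {B : List Int} {i k : Nat} (h : k ∈ nzPos B i) : k < i := by
  unfold nzPos at h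
  have := List.mem_filter.mp h
  simpa using this.1

lemma nzPos_pairwise (B : List Int) (i : Nat) : (nzPos B i).Pairwise (· < ·) := by
  exact (List.pairwise_lt_range).filter _

-- down_value at index i is A at the last listed position before i (default 0)
lemma lastDown_eq (A B : List Int) (i : Nat) :
    lastDown A B i = ((nzPos B i).getLast?).elim 0 (fun j => A.getD j 0) := by
  induction i with
  | zero => simp [lastDown, nzPos]
  | succ k ih =>
      have e : lastDown A B (k + 1) = if B.getD k 0 == 0 then lastDown A B k else A.getD k 0 := rfl
      rw [e]
      unfold nzPos at *
      rw [List.range_succ, List.filter_append, List.filter_singleton]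
      by_cases h : B[k]?.getD 0 = 0
      · simpa [h] using ih
      · simp [h, Bool.cond_eq_ite, beq_iff_eq]

-- invariant-based correctness of Source B's hand-written binary search
lemma bsearch_spec (pos : List Int) (i : Int)
    (mono : ∀ p q : Nat, p < q → q < pos.length → pos.getD p 0 ≤ pos.getD q 0) :
    ∀ (m lo hi : Nat), hi - lo ≤ m → hi ≤ pos.length → lo ≤ hi →
      (∀ k, k < lo → pos.getD k 0 < i) → (∀ k, hi ≤ k → k < pos.length → i ≤ pos.getD k 0) →
      lo ≤ bsearch pos i m lo hi ∧ bsearch pos i m lo hi ≤ hi ∧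
      (∀ k, k < bsearch pos i m lo hi → pos.getD k 0 < i) ∧
      (∀ k, bsearch pos i m lo hi ≤ k → k < pos.length → i ≤ pos.getD k 0) := by
  intro m
  induction m with
  | zero =>
      intro lo hi hm hhi hlh hlow hup
      rw [bsearch]
      exact ⟨le_refl _, by omega, hlow, fun k hk hk2 => hup k (by omega) hk2⟩
  | succ m ih =>
      intro lo hi hm hhi hlh hlow hup
      by_cases hlt : lo < hi
      · rw [bsearch, if_pos hlt]
        simp only []
        set mid := (lo + hi) / 2 with hmid
        have hmlo : lo ≤ mid := by omega
        have hmhi : mid < hi := by omega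
        rw [PySem.List.pyGetD_natCast]
        by_cases hc : pos.getD mid 0 < i
        · rw [if_pos hc]
          refine (ih (mid + 1) hi (by omega) hhi (by omega) ?_ hup).imp (by omega) (fun x => x)
          intro k hk
          rcases Nat.lt_or_ge k lo with h1 | h1
          · exact hlow k h1
          · rcases Nat.eq_or_lt_of_le (Nat.le_of_lt_succ hk) with h2 | h2
            · exact h2 ▸ hc
            · exact lt_of_le_of_lt (mono k mid h2 (by omega)) hc
        · rw [if_neg hc]
          refine (ih lo mid (by omega) (by omega) hmlo hlow ?_).imp (fun x => x) (fun h => ⟨by omega, h.2⟩)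
          intro k hk hk2
          rcases Nat.eq_or_lt_of_le hk with h2 | h2
          · exact h2 ▸ (not_lt.mp hc)
          · exact le_trans (not_lt.mp hc) (mono mid k h2 hk2)
      · rw [bsearch, if_neg hlt]
        exact ⟨le_refl _, by omega, hlow, fun k hk hk2 => hup k (by omega) hk2⟩

-- the position table plus the binary search recompute exactly A's carried down_value
lemma prev_eq (A B : List Int) (j : Nat) (hj : j ≤ B.length) :
    (let pos := (nzPos B B.length).map (fun k : Nat => (k : Int));
     let lo := bsearch pos (j : Int) pos.length 0 pos.length;
     if 0 < lo then PySem.List.pyGetD A (PySem.List.pyGetD pos ((lo : Int) - 1) 0) 0 else 0)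
      = lastDown A B j := by
  rw [lastDown_eq]
  set L := nzPos B j with hL
  set R := (List.range' j (B.length - j)).filter (fun k => !(B.getD k 0 == 0)) with hR
  have hsplit : nzPos B B.length = L ++ R := nzPos_split B hj
  set pos := (nzPos B B.length).map (fun k : Nat => (k : Int)) with hpos
  have hlen : pos.length = L.length + R.length := by
    rw [hpos, List.length_map, hsplit, List.length_append]
  have hgetpos : ∀ k (hk : k < pos.length), pos.getD k 0 = (((L ++ R)[k]'(by rw [List.length_append]; omega) : Nat) : Int) := by
    intro k hk
    rw [List.getD_eq_getElem _ _ hk]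
    simp only [hpos, hsplit]
    rw [List.getElem_map]
  have hmemL : ∀ x ∈ L, x < j := fun x hx => nzPos_mem_lt hx
  have hmemR : ∀ x ∈ R, j ≤ x := by
    intro x hx
    rw [hR] at hx
    have := (List.mem_filter.mp hx).1
    exact (List.mem_range'_1.mp this).1
  have hpw : pos.Pairwise (· < ·) := by
    rw [hpos]
    exact List.Pairwise.map _ (fun a b h => by exact_mod_cast h) (nzPos_pairwise B B.length)
  have mono : ∀ p q : Nat, p < q → q < pos.length → pos.getD p 0 ≤ pos.getD q 0 := by
    intro p q hpq hq
    have := List.pairwise_iff_getElem.mp hpw p q (by omega) hq hpq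
    rw [List.getD_eq_getElem _ _ (by omega), List.getD_eq_getElem _ _ hq]
    exact le_of_lt this
  obtain ⟨-, hrhi, hlow, hup⟩ :=
    bsearch_spec pos (j : Int) mono pos.length 0 pos.length (by omega) (le_refl _) (by omega)
      (by omega) (by intro k hk1 hk2; omega)
  set r := bsearch pos (j : Int) pos.length 0 pos.length with hr
  have hreq : r = L.length := by
    by_contra hne
    rcases Nat.lt_or_ge r L.length with hlt | hge
    · have hrlen : r < pos.length := by omega
      have h1 := hup r (le_refl _) hrlen
      rw [hgetpos r hrlen] at h1
      have h2 : (L ++ R)[r]'(by rw [List.length_append]; omega) = L[r]'hlt :=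
        List.getElem_append_left hlt
      rw [h2] at h1
      have h3 : (L[r]'hlt : Nat) < j := hmemL _ (List.getElem_mem _)
      omega
    · have hgt : L.length < r := by omega
      have hklen : L.length < pos.length := by omega
      have h1 := hlow L.length hgt
      rw [hgetpos L.length hklen] at h1
      have hR0 : 0 < R.length := by omega
      have h2 : (L ++ R)[L.length]'(by rw [List.length_append]; omega) = R[0]'hR0 := by
        rw [List.getElem_append_right (le_refl _)]
        congr 1
        omega
      rw [h2] at h1
      have h3 : j ≤ (R[0]'hR0 : Nat) := hmemR _ (List.getElem_mem _)
      omega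
  show (if 0 < r then PySem.List.pyGetD A (PySem.List.pyGetD pos ((r : Int) - 1) 0) 0 else 0) = _
  by_cases hpos0 : 0 < r
  · rw [if_pos hpos0]
    have hcast : ((r : Int) - 1) = (((r - 1 : Nat)) : Int) := by omega
    rw [hcast, PySem.List.pyGetD_natCast]
    have hrl : r - 1 < pos.length := by omega
    have hrlL : r - 1 < L.length := by omega
    have hidx : r - 1 = L.length - 1 := by omega
    have hlast : L.getLast? = L[r - 1]? := by rw [List.getLast?_eq_getElem?, hidx]
    have hsome : L[r - 1]? = some (L[r - 1]'hrlL) := List.getElem?_eq_getElem hrlL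
    rw [hlast, hsome]
    have hval : pos.getD (r - 1) 0 = ((L[r - 1]'hrlL : Nat) : Int) := by
      rw [hgetpos (r - 1) hrl]
      exact congrArg _ (List.getElem_append_left hrlL)
    rw [hval, PySem.List.pyGetD_natCast]
    rfl
  · rw [if_neg hpos0]
    have hL0 : L.length = 0 := by omega
    have hLnil : L = [] := List.eq_nil_of_length_eq_zero hL0
    rw [hLnil]
    rfl

-- both loops, started at index j with A's state down_value = lastDown j, agree from j on
lemma mainLoop (A B : List Int) :
    ∀ (m j : Nat) (res : Int), j + m = B.length →
    ((PySem.List.pyRange (j : Int) (B.length : Int) 1).foldl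
      (fun (st : Int × Int) i =>
        if PySem.List.pyGetD B i 0 = 0 then
          (if PySem.List.pyGetD A i 0 > st.2 then (st.1 + 1, st.2) else st)
        else
          (st.1, PySem.List.pyGetD A i 0))
      (res, lastDown A B j)).1
    = (PySem.List.pyRange (j : Int) (B.length : Int) 1).foldl
        (fun cnt i =>
          if PySem.List.pyGetD B i 0 = 0 then
            let pos := (nzPos B B.length).map (fun k : Nat => (k : Int))
            let lo := bsearch pos i pos.length 0 pos.length
            let prev := if 0 < lo then PySem.List.pyGetD A (PySem.List.pyGetD pos ((lo : Int) - 1) 0) 0 else 0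
            if PySem.List.pyGetD A i 0 > prev then cnt + 1 else cnt
          else cnt) res := by
  intro m
  induction m with
  | zero =>
      intro j res hj
      rw [PySem.List.pyRange_one_eq_nil (by omega)]
      simp
  | succ m ih =>
      intro j res hj
      have hjlt : j < B.length := by omega
      rw [PySem.List.pyRange_one_cons (by exact_mod_cast hjlt)]
      simp only [List.foldl_cons]
      have hprev := prev_eq A B j (by omega)
      simp only [] at hprev
      have hcast : ((j : Int) + 1) = ((j + 1 : Nat) : Int) := by push_cast; ring
      by_cases hB : PySem.List.pyGetD B (j : Int) 0 = 0
      · have hB' : B[j]?.getD 0 = 0 := by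
          have h0 := hB
          rwa [PySem.List.pyGetD_natCast, List.getD_eq_getElem?_getD] at h0
        have hld : lastDown A B (j + 1) = lastDown A B j := by
          have e : lastDown A B (j + 1) = if B.getD j 0 == 0 then lastDown A B j else A.getD j 0 := rfl
          rw [e]
          simp [List.getD_eq_getElem?_getD, hB']
        simp only [if_pos hB, hprev]
        by_cases hA : PySem.List.pyGetD A (j : Int) 0 > lastDown A B j
        · rw [if_pos hA, if_pos hA, hcast]
          have h2 := ih (j + 1) (res + 1) (by omega)
          rw [hld] at h2
          exact h2
        · rw [if_neg hA, if_neg hA, hcast]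
          have h2 := ih (j + 1) res (by omega)
          rw [hld] at h2
          exact h2
      · have hB' : ¬ B[j]?.getD 0 = 0 := by
          have h0 := hB
          rwa [PySem.List.pyGetD_natCast, List.getD_eq_getElem?_getD] at h0
        have hld : lastDown A B (j + 1) = PySem.List.pyGetD A (j : Int) 0 := by
          have e : lastDown A B (j + 1) = if B.getD j 0 == 0 then lastDown A B j else A.getD j 0 := rfl
          rw [e, PySem.List.pyGetD_natCast]
          simp [List.getD_eq_getElem?_getD, hB']
        simp only [if_neg hB]
        rw [hcast, ← hld]
        exact ih (j + 1) res (by omega)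

-- ===== VERDICT (by name: the statement is the Claim_ definition above) =====
theorem solution_spec : Claim_equal_solution := by
  intro A B _hdom _hpre
  unfold Spec_solution solution solution_alt
  have h := mainLoop A B B.length 0 0 (by omega)
  simp only [lastDown] at h
  simp only [pos_eq] at h ⊢
  exact h
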